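-- pv_equiv track=rewrite | github.com/pypi-data/pypi-mirror-340 | packages/SVDClassifier/SVDClassifier-0.1.1-py3-none-any.whl/SVDC/SVDC.py | calculate_expected_size
-- ===== SOURCE A (Python) =====
-- def calculate_expected_size(layerCount, inputDimension, outputSize):
--     """
--     Calculates the expected length of a chromosome in the SVDC algorithm
--     depending on the SVDC layer count, input dimension, and output size
--     """
--     layerSizes = []
--     for i in range(layerCount):
--         is_final = (i == layerCount - 1)
--         layer_output = outputSize if is_final else inputDimension
--         layer_len = 4 * (inputDimension ** 2) + 3 + 2 * layer_output
--         layerSizes.append(layer_len)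
--     expected_length = sum(layerSizes)
--     return expected_length
-- ===== SOURCE B (Python) =====
-- def calculate_expected_size(layerCount, inputDimension, outputSize):
--     # Closed-form: every layer costs 4*d^2+3, non-final layers add 2*d, the final adds 2*outputSize.
--     if layerCount <= 0:
--         return 0
--     per = 4 * inputDimension ** 2 + 3
--     return layerCount * per + 2 * inputDimension * (layerCount - 1) + 2 * outputSize
-- ===== Notes on version B (the rewrite author's own statement) =====
-- stated objective: faster
-- what changed: Replaced the O(layerCount) loop that builds and sums a list of per-layer lengths with a closed-form arithmetic formula.
import Mathlib
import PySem

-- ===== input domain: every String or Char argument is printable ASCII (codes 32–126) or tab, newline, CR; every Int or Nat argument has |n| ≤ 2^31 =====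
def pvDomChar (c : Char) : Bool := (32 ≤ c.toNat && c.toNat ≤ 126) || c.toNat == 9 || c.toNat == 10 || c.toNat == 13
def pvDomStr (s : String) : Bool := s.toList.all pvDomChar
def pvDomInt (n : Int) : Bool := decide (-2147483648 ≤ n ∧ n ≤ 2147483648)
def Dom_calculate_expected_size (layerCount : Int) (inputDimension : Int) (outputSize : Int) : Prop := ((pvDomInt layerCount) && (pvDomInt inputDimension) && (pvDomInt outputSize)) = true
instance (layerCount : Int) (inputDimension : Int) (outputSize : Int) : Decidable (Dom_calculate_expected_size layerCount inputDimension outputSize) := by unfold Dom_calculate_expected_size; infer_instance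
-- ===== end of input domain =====

-- B replaces A's O(layerCount) summation loop with a closed-form arithmetic formula (faster in a timing run).


-- ===== PORT A =====
-- literal transliteration: build layerSizes over range(layerCount), then sum
def calculate_expected_size (layerCount : Int) (inputDimension : Int) (outputSize : Int) : Int :=
  let layerSizes := (PySem.List.pyRange 0 layerCount 1).map (fun i =>
    let is_final := (i == layerCount - 1)
    let layer_output := if is_final then outputSize else inputDimension
    4 * (inputDimension ^ 2) + 3 + 2 * layer_output)
  layerSizes.foldl (· + ·) 0

-- ===== PORT B =====
def calculate_expected_size_alt (layerCount : Int) (inputDimension : Int) (outputSize : Int) : Int :=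
  if layerCount ≤ 0 then 0
  else
    let per := 4 * inputDimension ^ 2 + 3
    layerCount * per + 2 * inputDimension * (layerCount - 1) + 2 * outputSize

-- ===== PRECONDITION & SPEC =====
def Spec_calculate_expected_size (layerCount : Int) (inputDimension : Int) (outputSize : Int) (out : Int) : Prop := out = calculate_expected_size_alt layerCount inputDimension outputSize
instance (layerCount : Int) (inputDimension : Int) (outputSize : Int) (out : Int) : Decidable (Spec_calculate_expected_size layerCount inputDimension outputSize out) := by unfold Spec_calculate_expected_size; infer_instance

-- ===== CLAIM =====
def Claim_equal_calculate_expected_size : Prop := ∀ (layerCount : Int) (inputDimension : Int) (outputSize : Int), Dom_calculate_expected_size layerCount inputDimension outputSize → Spec_calculate_expected_size layerCount inputDimension outputSize (calculate_expected_size layerCount inputDimension outputSize)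

-- ===== LEMMAS AND PROOFS =====

theorem sum_const_range (m : Nat) (v : Int) :
    ((List.range m).map (fun _ => v)).sum = (m : Int) * v := by
  induction m with
  | zero => simp
  | succ k ih =>
    rw [List.range_succ]
    simp [ih]
    ring

theorem ces_eq (L d o : Int) :
    calculate_expected_size L d o = calculate_expected_size_alt L d o := by
  unfold calculate_expected_size calculate_expected_size_alt
  rw [show ∀ l : List Int, l.foldl (· + ·) 0 = l.sum from fun l => List.sum_eq_foldl.symm]
  rw [PySem.List.pyRange_one]
  by_cases hL : L ≤ 0
  · have h0 : (L - 0).toNat = 0 := by omega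
    rw [h0]
    simp [hL]
  · have hpos : 0 < L := by omega
    obtain ⟨m, hm⟩ : ∃ m : Nat, (L - 0).toNat = m + 1 :=
      ⟨(L - 0).toNat - 1, by omega⟩
    have hLm : L = (m : Int) + 1 := by omega
    rw [hm, List.range_succ]
    simp only [List.map_append, List.map_map, List.sum_append, List.map_cons, List.map_nil,
      List.sum_cons, List.sum_nil]
    have hlast : ((0 : Int) + (m : Int) == L - 1) = true := by
      simp [hLm]
    have hrest : (List.range m).map ((fun i =>
        4 * (d ^ 2) + 3 + 2 * (if (i == L - 1) then o else d)) ∘ (fun k : Nat => (0 : Int) + (k : Int)))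
        = (List.range m).map (fun _ => 4 * (d ^ 2) + 3 + 2 * d) := by
      apply List.map_congr_left
      intro k hk
      have hk' : k < m := List.mem_range.mp hk
      simp [Function.comp]
      intro h
      omega
    rw [hrest, sum_const_range]
    simp only [hlast, if_pos, hL]
    simp [hLm]
    ring

-- ===== VERDICT =====
theorem calculate_expected_size_spec : Claim_equal_calculate_expected_size := by
  intro L d o _
  unfold Spec_calculate_expected_size
  exact ces_eq L d o
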